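-- pv_equiv track=rewrite | github.com/miloszlakomy/competitive | codeforces/1263D/a.py | solve
-- ===== SOURCE A (Python) =====
-- class FindUnion:
--     def __init__(self):
--         self._sets = {}  # Maps elements to parents.
--         self._count = 0
--
--     def makeset(self, x):
--         if x not in self._sets:
--             self._sets[x] = x
--             self._count += 1
--
--     def find(self, x):
--         parent = self._sets[x]
--
--         if self._sets[parent] == parent:
--             return parent
--
--         self._sets[x] = self._sets[parent]
--         _ = self.find(x)
--         return self.find(parent)
--
--     def union(self, x, y):
--         x_root = self.find(x)
--         y_root = self.find(y)
--
--         if x_root != y_root: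
--             self._sets[x_root] = y_root
--             self._count -= 1
--
--     def getcount(self):
--         return self._count
--
-- def solve(F):
--     FU = FindUnion()
--
--     for f in F:
--         letters = list(f)
--         for a in letters:
--             FU.makeset(a)
--         for i in range(len(letters)):
--             a = letters[i]
--             for j in range(i+1, len(letters)):
--                 b = letters[j]
--                 FU.union(a, b)
--
--     return FU.getcount()
-- ===== SOURCE B (Python) =====
-- def solve(F):
--     comps = []  # disjoint nonempty sets of letters, one per connected component
--     for f in F:
--         s = set(f)
--         if not s:
--             continue
--         merged = set(s)
--         keep = []
--         for c in comps:
--             if c & s: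
--                 merged |= c
--             else:
--                 keep.append(c)
--         comps = keep + [merged]
--     return len(comps)
-- ===== Notes on version B (the rewrite author's own statement) =====
-- stated objective: faster
-- what changed: replaces the union-find with quadratic all-pairs unions per string by a single pass that keeps the components as a list of disjoint letter sets and merges every set intersecting the string's letters in one sweep
import Mathlib
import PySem

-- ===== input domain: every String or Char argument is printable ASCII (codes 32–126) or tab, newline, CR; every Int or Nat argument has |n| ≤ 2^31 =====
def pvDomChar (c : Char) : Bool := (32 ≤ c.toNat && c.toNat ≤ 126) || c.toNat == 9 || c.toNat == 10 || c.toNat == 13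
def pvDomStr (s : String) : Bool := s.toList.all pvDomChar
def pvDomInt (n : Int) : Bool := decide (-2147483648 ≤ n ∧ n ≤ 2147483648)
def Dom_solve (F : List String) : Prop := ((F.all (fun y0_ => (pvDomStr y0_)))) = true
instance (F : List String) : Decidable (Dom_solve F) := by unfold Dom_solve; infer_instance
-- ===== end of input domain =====

-- B replaces the per-string all-pairs union-find of A by a single sweep that keeps the
-- components as a list of disjoint letter sets and merges every set meeting the string's
-- letters (objective: faster).

-- ===== PORT A =====
-- FindUnion.makeset (state = (parent dict, count))
def fuMakeset (s : PySem.Dict Char Char) (c : Int) (x : Char) :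
    PySem.Dict Char Char × Int :=
  if s.contains x = false then (s.insert x x, c + 1) else (s, c)

-- FindUnion.find; Python's recursion terminates because parent chains reach a root, the
-- fuel only makes the same recursion structural (callers pass the dict size, which the
-- proofs show is never exhausted); `none` from get? is Python's KeyError (never hit here).
def fuFind : Nat → PySem.Dict Char Char → Char → Char × PySem.Dict Char Char
  | 0, s, x => (x, s)
  | n+1, s, x =>
    match s.get? x with
    | none => (x, s)
    | some parent =>
      match s.get? parent with
      | none => (parent, s)
      | some pp =>
        if pp = parent then (parent, s)
        else
          let s1 := s.insert x pp          -- self._sets[x] = self._sets[parent]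
          let r1 := fuFind n s1 x          -- _ = self.find(x)
          fuFind n r1.2 parent             -- return self.find(parent)

-- FindUnion.union
def fuUnion (s : PySem.Dict Char Char) (c : Int) (x y : Char) :
    PySem.Dict Char Char × Int :=
  let r1 := fuFind s.size s x
  let r2 := fuFind r1.2.size r1.2 y
  if r1.1 ≠ r2.1 then (r2.2.insert r1.1 r2.1, c - 1) else (r2.2, c)

def solve (F : List String) : Int :=
  (F.foldl (fun (st : PySem.Dict Char Char × Int) f =>
    let letters := f.toList
    let st1 := letters.foldl (fun st a => fuMakeset st.1 st.2 a) st
    (PySem.List.pyRange 0 (letters.length : Int)).foldl (fun st i =>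
      let a := PySem.List.pyGetD letters i ' '
      (PySem.List.pyRange (i+1) (letters.length : Int)).foldl (fun st j =>
        let b := PySem.List.pyGetD letters j ' '
        fuUnion st.1 st.2 a b) st) st1)
    (PySem.Dict.empty, 0)).2

-- ===== PORT B =====
def solve_alt (F : List String) : Int :=
  ((F.foldl (fun (comps : List (PySem.Set Char)) f =>
    let s := PySem.Set.ofList f.toList
    if s = [] then comps
    else
      let kp := comps.foldl
        (fun (acc : List (PySem.Set Char) × PySem.Set Char) c =>
          if PySem.Set.inter c s ≠ [] then (acc.1, PySem.Set.union acc.2 c)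
          else (acc.1 ++ [c], acc.2)) ([], s)
      kp.1 ++ [kp.2]) []).length : Int)

-- ===== PRECONDITION & SPEC =====
def Spec_solve (F : List String) (out : Int) : Prop := out = solve_alt F
instance (F : List String) (out : Int) : Decidable (Spec_solve F out) := by unfold Spec_solve; infer_instance

-- ===== CLAIM (what is proved, stated in full; the proofs are below) =====
def Claim_equal_solve : Prop := ∀ (F : List String), Dom_solve F → Spec_solve F (solve F)

-- ===== LEMMAS AND PROOFS =====

-- ---- abstract view of A's union-find state ----
def pf (s : PySem.Dict Char Char) (x : Char) : Char := s.getD x x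
abbrev isRoot (s : PySem.Dict Char Char) (x : Char) : Prop := pf s x = x
def hasRoot (s : PySem.Dict Char Char) (x : Char) : Prop := ∃ n, isRoot s ((pf s)^[n] x)

noncomputable def dep (s : PySem.Dict Char Char) (x : Char) : Nat :=
  @dite _ (hasRoot s x) (Classical.propDecidable _)
    (fun h => Nat.find (p := fun n => isRoot s ((pf s)^[n] x)) h) (fun _ => 0)

noncomputable def rootOf (s : PySem.Dict Char Char) (x : Char) : Char :=
  (pf s)^[dep s x] x

def InvA (s : PySem.Dict Char Char) : Prop :=
  s.keys.Nodup ∧ (∀ x ∈ s.keys, pf s x ∈ s.keys) ∧ (∀ x, hasRoot s x)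

def rootsCount (s : PySem.Dict Char Char) : Nat :=
  (s.keys.filter (fun z => decide (isRoot s z))).length

noncomputable def eqv (s : PySem.Dict Char Char) (z w : Char) : Prop :=
  rootOf s z = rootOf s w

-- relation between A's state and B's component list
def RelAB (s : PySem.Dict Char Char) (comps : List (PySem.Set Char)) : Prop :=
  (∀ z, z ∈ s.keys ↔ ∃ c ∈ comps, z ∈ c)
  ∧ (∀ z w, z ∈ s.keys → w ∈ s.keys → (eqv s z w ↔ ∃ c ∈ comps, z ∈ c ∧ w ∈ c))
  ∧ List.Pairwise (fun c c' => ∀ z, z ∈ c → z ∉ c') comps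
  ∧ (∀ c ∈ comps, c ≠ [])

-- ---- basic facts ----
lemma pf_of_not_mem (s : PySem.Dict Char Char) (x : Char) (h : x ∉ s.keys) :
    pf s x = x := by
  have h2 := (PySem.Dict.get?_eq_none_iff_not_mem_keys s x).2 h
  simp [pf, PySem.Dict.getD_eq_get?_getD, h2]

lemma dep_isRoot {s : PySem.Dict Char Char} {x : Char} (h : hasRoot s x) :
    isRoot s ((pf s)^[dep s x] x) := by
  unfold dep
  rw [dif_pos h]
  exact Nat.find_spec (p := fun n => isRoot s ((pf s)^[n] x)) h

lemma dep_le {s : PySem.Dict Char Char} {x : Char} {n : Nat}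
    (h : isRoot s ((pf s)^[n] x)) : dep s x ≤ n := by
  have hr : hasRoot s x := ⟨n, h⟩
  unfold dep
  rw [dif_pos hr]
  exact Nat.find_le (p := fun n => isRoot s ((pf s)^[n] x)) h

lemma dep_min {s : PySem.Dict Char Char} {x : Char} (h : hasRoot s x)
    {m : Nat} (hm : m < dep s x) : ¬ isRoot s ((pf s)^[m] x) := by
  unfold dep at hm
  rw [dif_pos h] at hm
  exact Nat.find_min (p := fun n => isRoot s ((pf s)^[n] x)) h hm

lemma iterate_stable {s : PySem.Dict Char Char} {x : Char} {n : Nat}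
    (h : isRoot s ((pf s)^[n] x)) : ∀ m, n ≤ m → (pf s)^[m] x = (pf s)^[n] x := by
  intro m hm
  obtain ⟨k, rfl⟩ := Nat.exists_eq_add_of_le hm
  induction k with
  | zero => rfl
  | succ k ih =>
      have h1 : n + (k+1) = (n + k) + 1 := by ring
      rw [h1, Function.iterate_succ_apply', ih (by omega)]
      exact h

lemma rootOf_eq_iterate {s : PySem.Dict Char Char} {x : Char} {n : Nat}
    (h : isRoot s ((pf s)^[n] x)) : rootOf s x = (pf s)^[n] x := by
  have hr : hasRoot s x := ⟨n, h⟩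
  have hle : dep s x ≤ n := dep_le h
  unfold rootOf
  rw [iterate_stable (dep_isRoot hr) n hle]

lemma isRoot_rootOf {s : PySem.Dict Char Char} {x : Char} (h : hasRoot s x) :
    isRoot s (rootOf s x) := dep_isRoot h

lemma rootOf_of_isRoot {s : PySem.Dict Char Char} {x : Char} (h : isRoot s x) :
    rootOf s x = x := rootOf_eq_iterate (n := 0) h

lemma rootOf_of_not_mem (s : PySem.Dict Char Char) (x : Char) (h : x ∉ s.keys) :
    rootOf s x = x := rootOf_of_isRoot (pf_of_not_mem s x h)

lemma eqv_refl (s : PySem.Dict Char Char) (z : Char) : eqv s z z := rfl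

lemma hasRoot_pf {s : PySem.Dict Char Char} {x : Char} (hroot : hasRoot s x)
    (hx : ¬ isRoot s x) : hasRoot s (pf s x) := by
  obtain ⟨n, hn⟩ := hroot
  cases n with
  | zero => exact absurd hn hx
  | succ n => exact ⟨n, by rwa [Function.iterate_succ_apply] at hn⟩

lemma dep_pf {s : PySem.Dict Char Char} {x : Char} (hroot : hasRoot s x)
    (hx : ¬ isRoot s x) : dep s x = dep s (pf s x) + 1 := by
  have hpf : hasRoot s (pf s x) := hasRoot_pf hroot hx
  have h1 : isRoot s ((pf s)^[dep s (pf s x) + 1] x) := by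
    rw [Function.iterate_succ_apply]
    exact dep_isRoot hpf
  have hle : dep s x ≤ dep s (pf s x) + 1 := dep_le h1
  have hge : dep s (pf s x) + 1 ≤ dep s x := by
    have hpos : 1 ≤ dep s x := by
      rcases Nat.eq_zero_or_pos (dep s x) with h0 | h1
      · exfalso
        apply hx
        have h2 := dep_isRoot hroot
        rw [h0] at h2
        simpa using h2
      · exact h1
    have h2 : isRoot s ((pf s)^[dep s x - 1] (pf s x)) := by
      have h3 : dep s x - 1 + 1 = dep s x := by omega
      have h4 := dep_isRoot hroot
      rw [← h3, Function.iterate_succ_apply] at h4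
      exact h4
    have := dep_le h2
    omega
  omega

lemma rootOf_pf {s : PySem.Dict Char Char} {x : Char} (hroot : hasRoot s x)
    (hx : ¬ isRoot s x) : rootOf s x = rootOf s (pf s x) := by
  have hpf : hasRoot s (pf s x) := hasRoot_pf hroot hx
  have h1 : isRoot s ((pf s)^[dep s (pf s x) + 1] x) := by
    rw [Function.iterate_succ_apply]
    exact dep_isRoot hpf
  rw [rootOf_eq_iterate h1, Function.iterate_succ_apply]
  rfl

lemma iterate_mem {s : PySem.Dict Char Char} (hInv : InvA s) {x : Char}
    (hx : x ∈ s.keys) : ∀ n, (pf s)^[n] x ∈ s.keys := by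
  intro n
  induction n with
  | zero => exact hx
  | succ n ih => rw [Function.iterate_succ_apply']; exact hInv.2.1 _ ih

lemma rootOf_mem {s : PySem.Dict Char Char} (hInv : InvA s) {x : Char}
    (hx : x ∈ s.keys) : rootOf s x ∈ s.keys := iterate_mem hInv hx _

lemma dep_iterate {s : PySem.Dict Char Char} (hInv : InvA s) (x : Char) :
    ∀ k, k ≤ dep s x → dep s ((pf s)^[k] x) = dep s x - k := by
  intro k
  induction k with
  | zero => simp
  | succ k ih =>
      intro hk
      have hk' : k ≤ dep s x := by omega
      have h1 : ¬ isRoot s ((pf s)^[k] x) := dep_min (hInv.2.2 x) (by omega)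
      have h2 := dep_pf (hInv.2.2 ((pf s)^[k] x)) h1
      have h3 := ih hk'
      rw [Function.iterate_succ_apply']
      omega

lemma dep_lt_size {s : PySem.Dict Char Char} (hInv : InvA s) {x : Char}
    (hx : x ∈ s.keys) : dep s x < s.keys.length := by
  have hnd : ((List.range (dep s x + 1)).map (fun k => (pf s)^[k] x)).Nodup := by
    refine List.Nodup.map_on ?_ (List.nodup_range)
    intro a ha b hb hab
    simp only [List.mem_range] at ha hb
    have da := dep_iterate hInv x a (by omega)
    have db := dep_iterate hInv x b (by omega)
    rw [hab] at da
    omega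
  have hsub : ((List.range (dep s x + 1)).map (fun k => (pf s)^[k] x)) ⊆ s.keys := by
    intro z hz
    simp only [List.mem_map, List.mem_range] at hz
    obtain ⟨k, -, rfl⟩ := hz
    exact iterate_mem hInv hx k
  have := (List.subperm_of_subset hnd hsub).length_le
  simpa using this

lemma size_eq_keys_length (s : PySem.Dict Char Char) : s.size = s.keys.length := by
  simp [PySem.Dict.size, PySem.Dict.keys]

-- chains along which pf is unchanged iterate identically
lemma iterate_congr {s s' : PySem.Dict Char Char} {a : Char}
    (hpf : ∀ z, z ≠ a → pf s' z = pf s z) : ∀ (n : Nat) (x : Char),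
    (∀ k, k < n → (pf s)^[k] x ≠ a) → (pf s')^[n] x = (pf s)^[n] x := by
  intro n
  induction n with
  | zero => intro x _; rfl
  | succ n ih =>
      intro x h
      rw [Function.iterate_succ_apply, Function.iterate_succ_apply]
      rw [hpf x (h 0 (by omega))]
      exact ih (pf s x) (fun k hk => by
        rw [← Function.iterate_succ_apply]
        exact h (k+1) (by omega))

-- ---- transferring chains to a modified dict ----
lemma chain_transfer {s s' : PySem.Dict Char Char} {a : Char}
    (hpf : ∀ w, w ≠ a → pf s' w = pf s w) {z : Char} (hz : hasRoot s z)
    (hch : ∀ k, k ≤ dep s z → (pf s)^[k] z ≠ a) :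
    hasRoot s' z ∧ rootOf s' z = rootOf s z ∧ dep s' z ≤ dep s z := by
  have hit : (pf s')^[dep s z] z = (pf s)^[dep s z] z :=
    iterate_congr hpf _ z (fun k hk => hch k (by omega))
  have hroot' : isRoot s' ((pf s')^[dep s z] z) := by
    rw [hit]
    show pf s' _ = _
    rw [hpf _ (hch _ le_rfl)]
    exact dep_isRoot hz
  refine ⟨⟨_, hroot'⟩, ?_, dep_le hroot'⟩
  rw [rootOf_eq_iterate hroot', hit]
  rfl

lemma chain_avoids_fresh {s : PySem.Dict Char Char} (hInv : InvA s) {x : Char}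
    (hx : x ∉ s.keys) {z : Char} (hz : z ≠ x) :
    ∀ k, (pf s)^[k] z ≠ x := by
  intro k
  induction k with
  | zero => exact hz
  | succ k ih =>
      rw [Function.iterate_succ_apply']
      set w := (pf s)^[k] z with hw
      by_cases hmem : w ∈ s.keys
      · intro hcon
        exact hx (hcon ▸ hInv.2.1 w hmem)
      · rw [pf_of_not_mem s w hmem]
        exact ih

lemma rootsCount_congr {s s' : PySem.Dict Char Char}
    (hk : s'.keys = s.keys) (h : ∀ z ∈ s.keys, (isRoot s' z ↔ isRoot s z)) :
    rootsCount s' = rootsCount s := by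
  unfold rootsCount
  rw [hk]
  have hfc : s.keys.filter (fun z => decide (isRoot s' z))
      = s.keys.filter (fun z => decide (isRoot s z)) :=
    List.filter_congr (fun z hz => by
      show decide (isRoot s' z) = decide (isRoot s z)
      rw [decide_eq_decide]
      exact h z hz)
  rw [hfc]

-- ---- effect of makeset ----
lemma makeset_ok {s : PySem.Dict Char Char} (hInv : InvA s) (c : Int) (x : Char) :
    InvA (fuMakeset s c x).1
    ∧ (fuMakeset s c x).1.keys = PySem.Set.add s.keys x
    ∧ (∀ z, rootOf (fuMakeset s c x).1 z = rootOf s z)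
    ∧ (c = (rootsCount s : Int) →
        (fuMakeset s c x).2 = (rootsCount (fuMakeset s c x).1 : Int)) := by
  by_cases hc : s.contains x = false
  · -- fresh key
    have hxk : x ∉ s.keys := by
      intro hmem
      rw [(PySem.Dict.contains_iff_mem_keys s x).2 hmem] at hc
      exact Bool.true_eq_false.mp hc
    have hres : fuMakeset s c x = (s.insert x x, c + 1) := by
      simp [fuMakeset, hc]
    set s' := s.insert x x with hs'
    have hkeys : s'.keys = s.keys ++ [x] := PySem.Dict.keys_insert_of_not_contains s x hc
    have hpfx : pf s' x = x := by
      show (s.insert x x).getD x x = x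
      simp [PySem.Dict.getD_insert_self]
    have hpf : ∀ w, w ≠ x → pf s' w = pf s w := by
      intro w hw
      show (s.insert x x).getD w w = pf s w
      rw [PySem.Dict.getD_insert]
      simp [hw, pf]
    have hmain : ∀ z, hasRoot s' z ∧ rootOf s' z = rootOf s z ∧
        (isRoot s' z ↔ isRoot s z) := by
      intro z
      by_cases hz : z = x
      · subst hz
        have hr' : isRoot s' z := hpfx
        have hr : isRoot s z := pf_of_not_mem s z hxk
        exact ⟨⟨0, hr'⟩, by rw [rootOf_of_isRoot hr', rootOf_of_isRoot hr],
          iff_of_true hr' hr⟩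
      · obtain ⟨h1, h2, h3⟩ := chain_transfer hpf (hInv.2.2 z)
          (fun k _ => chain_avoids_fresh hInv hxk hz k)
        refine ⟨h1, h2, ?_⟩
        unfold isRoot
        rw [hpf z hz]
    rw [hres]
    refine ⟨⟨?_, ?_, fun z => (hmain z).1⟩, ?_, fun z => (hmain z).2.1, ?_⟩
    · exact PySem.Dict.nodup_keys_insert s x x hInv.1
    · intro z hz
      rw [hkeys] at hz ⊢
      simp only [List.mem_append, List.mem_singleton] at hz
      rcases hz with hz | hz
      · rw [hpf z (fun h => hxk (h ▸ hz))]
        simp [hInv.2.1 z hz]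
      · subst hz
        simp [hpfx]
    · rw [hkeys, PySem.Set.add_of_not_mem hxk]
    · intro hcc
      have hcount : rootsCount s' = rootsCount s + 1 := by
        unfold rootsCount
        rw [hkeys, List.filter_append]
        have h1 : (s.keys.filter (fun z => decide (isRoot s' z))).length
            = (s.keys.filter (fun z => decide (isRoot s z))).length := by
          have hfc : s.keys.filter (fun z => decide (isRoot s' z))
              = s.keys.filter (fun z => decide (isRoot s z)) :=
            List.filter_congr (fun z hz => by
              show decide (isRoot s' z) = decide (isRoot s z)
              rw [decide_eq_decide]
              exact (hmain z).2.2)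
          rw [hfc]
        have h2 : ([x].filter (fun z => decide (isRoot s' z))) = [x] := by
          rw [List.filter_singleton]
          simp [isRoot, hpfx]
        rw [List.length_append, h1, h2]
        simp
      simp only [hcount, hcc]
      push_cast
      ring
  · -- existing key: no-op
    have hres : fuMakeset s c x = (s, c) := by
      simp [fuMakeset, hc]
    have hxk : x ∈ s.keys := by
      rw [← PySem.Dict.contains_iff_mem_keys]
      revert hc
      cases s.contains x <;> simp
    rw [hres]
    exact ⟨hInv, by rw [PySem.Set.add_of_mem hxk], fun z => rfl, fun h => by
      simpa using h⟩

-- ---- effect of one path-compression write ----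
lemma compress_ok {s : PySem.Dict Char Char} (hInv : InvA s) {x : Char}
    (hx : x ∈ s.keys) (h1 : ¬ isRoot s x) (h2 : ¬ isRoot s (pf s x)) :
    InvA (s.insert x (pf s (pf s x)))
    ∧ (s.insert x (pf s (pf s x))).keys = s.keys
    ∧ (∀ z, rootOf (s.insert x (pf s (pf s x))) z = rootOf s z)
    ∧ (∀ z, dep (s.insert x (pf s (pf s x))) z ≤ dep s z)
    ∧ dep (s.insert x (pf s (pf s x))) x < dep s x
    ∧ (∀ z, isRoot (s.insert x (pf s (pf s x))) z ↔ isRoot s z) := by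
  set g := pf s (pf s x) with hg
  set s1 := s.insert x g with hs1
  have hdx : dep s x = dep s (pf s x) + 1 := dep_pf (hInv.2.2 x) h1
  have hdp : dep s (pf s x) = dep s g + 1 := dep_pf (hInv.2.2 (pf s x)) h2
  have hgx : g ≠ x := by
    intro hcon
    have : dep s g = dep s x := by rw [hcon]
    omega
  have hpfx : pf s1 x = g := by
    show (s.insert x g).getD x x = g
    simp [PySem.Dict.getD_insert_self]
  have hpf : ∀ w, w ≠ x → pf s1 w = pf s w := by
    intro w hw
    show (s.insert x g).getD w w = pf s w
    rw [PySem.Dict.getD_insert]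
    simp [hw, pf]
  have hxroot1 : ¬ isRoot s1 x := by
    unfold isRoot
    rw [hpfx]
    exact hgx
  have hkeys : s1.keys = s.keys := by
    exact PySem.Dict.keys_insert_of_contains s g
      ((PySem.Dict.contains_iff_mem_keys s x).2 hx)
  -- main chain analysis, by strong induction on dep s z
  have hmain : ∀ d z, dep s z = d → hasRoot s1 z ∧ rootOf s1 z = rootOf s z ∧
      dep s1 z ≤ dep s z := by
    intro d
    induction d using Nat.strong_induction_on with
    | _ d ih =>
      intro z hdz
      by_cases hzr : isRoot s z
      · have hzx : z ≠ x := fun h => h1 (h ▸ hzr)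
        have hr1 : isRoot s1 z := by
          unfold isRoot
          rw [hpf z hzx]
          exact hzr
        exact ⟨⟨0, hr1⟩, by rw [rootOf_of_isRoot hr1, rootOf_of_isRoot hzr],
          le_trans (dep_le (n := 0) hr1) (Nat.zero_le _)⟩
      · by_cases hzx : z = x
        · subst hzx
          have hdg : dep s g < dep s z := by omega
          obtain ⟨hg1, hg2, hg3⟩ := ih (dep s g) (by omega) g rfl
          have hpz : pf s1 z = g := hpfx
          have hroot1 : hasRoot s1 z := by
            obtain ⟨n, hn⟩ := hg1
            exact ⟨n + 1, by rwa [Function.iterate_succ_apply, hpz]⟩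
          have hd1 : dep s1 z = dep s1 g + 1 := by
            rw [dep_pf hroot1 hxroot1, hpz]
          have hr1 : rootOf s1 z = rootOf s g := by
            rw [rootOf_pf hroot1 hxroot1, hpz, hg2]
          refine ⟨hroot1, ?_, by omega⟩
          rw [hr1, rootOf_pf (hInv.2.2 z) hzr, rootOf_pf (hInv.2.2 (pf s z)) h2]
        · have hw : dep s (pf s z) < dep s z := by
            have := dep_pf (hInv.2.2 z) hzr
            omega
          obtain ⟨hw1, hw2, hw3⟩ := ih (dep s (pf s z)) (by omega) (pf s z) rfl
          have hpz : pf s1 z = pf s z := hpf z hzx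
          have hroot1 : hasRoot s1 z := by
            obtain ⟨n, hn⟩ := hw1
            exact ⟨n + 1, by rwa [Function.iterate_succ_apply, hpz]⟩
          have hzr1 : ¬ isRoot s1 z := by
            unfold isRoot
            rw [hpz]
            exact hzr
          have hd1 : dep s1 z = dep s1 (pf s z) + 1 := by
            rw [dep_pf hroot1 hzr1, hpz]
          have hr1 : rootOf s1 z = rootOf s (pf s z) := by
            rw [rootOf_pf hroot1 hzr1, hpz, hw2]
          have := dep_pf (hInv.2.2 z) hzr
          refine ⟨hroot1, ?_, by omega⟩
          rw [hr1, ← rootOf_pf (hInv.2.2 z) hzr]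
  have hiff : ∀ z, isRoot s1 z ↔ isRoot s z := by
    intro z
    by_cases hzx : z = x
    · subst hzx
      exact iff_of_false hxroot1 h1
    · unfold isRoot
      rw [hpf z hzx]
  refine ⟨⟨?_, ?_, fun z => (hmain _ z rfl).1⟩, hkeys, fun z => (hmain _ z rfl).2.1,
    fun z => (hmain _ z rfl).2.2, ?_, hiff⟩
  · rw [hs1] at hkeys ⊢
    rw [hkeys]
    exact hInv.1
  · intro z hz
    rw [hkeys] at hz ⊢
    by_cases hzx : z = x
    · subst hzx
      rw [hpfx]
      exact hInv.2.1 _ (hInv.2.1 _ hx)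
    · rw [hpf z hzx]
      exact hInv.2.1 z hz
  · have h3 := (hmain _ x rfl).2.2
    have h4 : dep s1 x = dep s1 g + 1 := by
      rw [dep_pf (hmain _ x rfl).1 hxroot1, hpfx]
    have h5 := (hmain _ g rfl).2.2
    omega

lemma get?_eq_pf {s : PySem.Dict Char Char} {x : Char} (hx : x ∈ s.keys) :
    s.get? x = some (pf s x) := by
  cases h : s.get? x with
  | none => exact absurd ((PySem.Dict.get?_eq_none_iff_not_mem_keys s x).1 h) (by simp [hx])
  | some v => rw [show pf s x = v from PySem.Dict.getD_of_get?_eq_some s x h]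

-- ---- effect of find ----
lemma find_ok : ∀ (n : Nat) (s : PySem.Dict Char Char) (x : Char), InvA s →
    x ∈ s.keys → dep s x < n →
    (fuFind n s x).1 = rootOf s x
    ∧ (fuFind n s x).2.keys = s.keys
    ∧ InvA (fuFind n s x).2
    ∧ (∀ z, rootOf (fuFind n s x).2 z = rootOf s z)
    ∧ (∀ z, dep (fuFind n s x).2 z ≤ dep s z)
    ∧ (∀ z, isRoot (fuFind n s x).2 z ↔ isRoot s z) := by
  intro n
  induction n with
  | zero => intro s x _ _ h; omega
  | succ n ih =>
    intro s x hInv hx hd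
    have hpx : pf s x ∈ s.keys := hInv.2.1 x hx
    have e1 := get?_eq_pf hx
    have e2 := get?_eq_pf hpx
    by_cases hroot : pf s (pf s x) = pf s x
    · -- parent is a root: return parent, state unchanged
      have hres : fuFind (n+1) s x = (pf s x, s) := by
        simp [fuFind, e1, e2, hroot]
      have hrx : rootOf s x = pf s x := by
        by_cases hr : isRoot s x
        · rw [rootOf_of_isRoot hr, hr]
        · rw [rootOf_pf (hInv.2.2 x) hr, rootOf_of_isRoot hroot]
      rw [hres]
      exact ⟨hrx.symm, rfl, hInv, fun z => rfl, fun z => le_rfl, fun z => Iff.rfl⟩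
    · -- compress, recurse on x, then on parent
      have h1 : ¬ isRoot s x := by
        intro hr
        apply hroot
        have : pf s x = x := hr
        rw [this]
        exact hr
      have hres : fuFind (n+1) s x =
          fuFind n (fuFind n (s.insert x (pf s (pf s x))) x).2 (pf s x) := by
        simp [fuFind, e1, e2, hroot]
      obtain ⟨hC1, hC2, hC3, hC4, hC5, hC6⟩ := compress_ok hInv hx h1 hroot
      set s1 := s.insert x (pf s (pf s x)) with hs1
      have hdx1 : dep s1 x < n := by
        have := dep_pf (hInv.2.2 x) h1
        omega
      obtain ⟨hF1, hF2, hF3, hF4, hF5, hF6⟩ :=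
        ih s1 x hC1 (by rw [hC2]; exact hx) hdx1
      set s2 := (fuFind n s1 x).2 with hs2
      have hdp2 : dep s2 (pf s x) < n := by
        have ha := hF5 (pf s x)
        have hb := hC4 (pf s x)
        have := dep_pf (hInv.2.2 x) h1
        omega
      obtain ⟨hG1, hG2, hG3, hG4, hG5, hG6⟩ :=
        ih s2 (pf s x) hF3 (by rw [hF2, hC2]; exact hpx) hdp2
      rw [hres]
      refine ⟨?_, by rw [hG2, hF2, hC2], hG3, ?_, ?_, ?_⟩
      · rw [hG1, hF4, hC3, ← rootOf_pf (hInv.2.2 x) h1]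
      · intro z
        rw [hG4 z, hF4 z, hC3 z]
      · intro z
        exact le_trans (hG5 z) (le_trans (hF5 z) (hC4 z))
      · intro z
        rw [hG6 z, hF6 z, hC6 z]

-- ---- effect of linking two distinct roots ----
lemma link_ok {s : PySem.Dict Char Char} (hInv : InvA s) {rx ry : Char}
    (hx : rx ∈ s.keys) (hy : ry ∈ s.keys) (hrx : isRoot s rx) (hry : isRoot s ry)
    (hne : rx ≠ ry) :
    InvA (s.insert rx ry)
    ∧ (s.insert rx ry).keys = s.keys
    ∧ (∀ z, rootOf (s.insert rx ry) z = if rootOf s z = rx then ry else rootOf s z)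
    ∧ rootsCount s = rootsCount (s.insert rx ry) + 1 := by
  set s' := s.insert rx ry with hs'
  have hpfx : pf s' rx = ry := by
    show (s.insert rx ry).getD rx rx = ry
    simp [PySem.Dict.getD_insert_self]
  have hpf : ∀ w, w ≠ rx → pf s' w = pf s w := by
    intro w hw
    show (s.insert rx ry).getD w w = pf s w
    rw [PySem.Dict.getD_insert]
    simp [hw, pf]
  have hkeys : s'.keys = s.keys :=
    PySem.Dict.keys_insert_of_contains s ry ((PySem.Dict.contains_iff_mem_keys s rx).2 hx)
  have hry' : isRoot s' ry := by
    unfold isRoot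
    rw [hpf ry (Ne.symm hne)]
    exact hry
  -- chains whose root is not rx never visit rx
  have havoid : ∀ z, rootOf s z ≠ rx → ∀ k, k ≤ dep s z → (pf s)^[k] z ≠ rx := by
    intro z hz k hk hcon
    rcases Nat.lt_or_ge k (dep s z) with hlt | hge
    · exact dep_min (hInv.2.2 z) hlt (hcon ▸ hrx)
    · have : k = dep s z := by omega
      subst this
      exact hz hcon
  have hmain : ∀ z, hasRoot s' z ∧
      rootOf s' z = if rootOf s z = rx then ry else rootOf s z := by
    intro z
    by_cases hz : rootOf s z = rx
    · -- chain reaches rx, then continues to ry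
      have hch : ∀ k, k < dep s z → (pf s)^[k] z ≠ rx := by
        intro k hk hcon
        exact dep_min (hInv.2.2 z) hk (hcon ▸ hrx)
      have hit : (pf s')^[dep s z] z = rx := by
        rw [iterate_congr hpf _ z hch]
        exact hz
      have hnext : (pf s')^[dep s z + 1] z = ry := by
        rw [Function.iterate_succ_apply', hit, hpfx]
      have hroot' : isRoot s' ((pf s')^[dep s z + 1] z) := by
        rw [hnext]
        exact hry'
      refine ⟨⟨_, hroot'⟩, ?_⟩
      rw [if_pos hz, rootOf_eq_iterate hroot', hnext]
    · obtain ⟨ha, hb, -⟩ := chain_transfer hpf (hInv.2.2 z) (havoid z hz)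
      rw [if_neg hz]
      exact ⟨ha, hb⟩
  have hiff : ∀ z, isRoot s' z ↔ (isRoot s z ∧ z ≠ rx) := by
    intro z
    by_cases hz : z = rx
    · subst hz
      refine iff_of_false ?_ (by simp)
      unfold isRoot
      rw [hpfx]
      exact Ne.symm hne
    · unfold isRoot
      rw [hpf z hz]
      simp [hz]
  refine ⟨⟨by rw [hkeys]; exact hInv.1, ?_, fun z => (hmain z).1⟩, hkeys,
    fun z => (hmain z).2, ?_⟩
  · intro z hz
    rw [hkeys] at hz ⊢
    by_cases hzx : z = rx
    · subst hzx
      rw [hpfx]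
      exact hy
    · rw [hpf z hzx]
      exact hInv.2.1 z hz
  · -- the root rx stops being a root; every other root is kept
    have hfc : s.keys.filter (fun z => decide (isRoot s' z))
        = (s.keys.filter (fun z => decide (isRoot s z))).filter (fun z => decide (z ≠ rx)) := by
      rw [List.filter_filter]
      exact List.filter_congr (fun z hz => by
        show decide (isRoot s' z) = (decide (z ≠ rx) && decide (isRoot s z))
        rw [show (decide (z ≠ rx) && decide (isRoot s z))
            = decide (z ≠ rx ∧ isRoot s z) by simp]
        rw [decide_eq_decide, hiff z]
        tauto)
    have hmem : rx ∈ s.keys.filter (fun z => decide (isRoot s z)) := by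
      rw [List.mem_filter]
      exact ⟨hx, by simpa using hrx⟩
    have hnd : (s.keys.filter (fun z => decide (isRoot s z))).Nodup :=
      List.Nodup.filter _ hInv.1
    have herase : (s.keys.filter (fun z => decide (isRoot s z))).filter
        (fun z => decide (z ≠ rx))
        = (s.keys.filter (fun z => decide (isRoot s z))).erase rx := by
      rw [List.Nodup.erase_eq_filter hnd]
      exact List.filter_congr (fun z _ => by by_cases h : z = rx <;> simp [h])
    unfold rootsCount
    rw [hkeys, hfc, herase, List.length_erase_of_mem hmem]
    have : 0 < (s.keys.filter (fun z => decide (isRoot s z))).length :=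
      List.length_pos_of_mem hmem
    omega

-- ---- effect of union ----
lemma union_ok {s : PySem.Dict Char Char} (hInv : InvA s) (c : Int) {x y : Char}
    (hx : x ∈ s.keys) (hy : y ∈ s.keys) :
    InvA (fuUnion s c x y).1
    ∧ (fuUnion s c x y).1.keys = s.keys
    ∧ (c = (rootsCount s : Int) → (fuUnion s c x y).2 = (rootsCount (fuUnion s c x y).1 : Int))
    ∧ (∀ z w, eqv (fuUnion s c x y).1 z w ↔
        eqv s z w ∨ (eqv s z x ∧ eqv s w y) ∨ (eqv s z y ∧ eqv s w x)) := by
  have hd1 : dep s x < s.size := by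
    rw [size_eq_keys_length]
    exact dep_lt_size hInv hx
  obtain ⟨hF1, hF2, hF3, hF4, hF5, hF6⟩ := find_ok s.size s x hInv hx hd1
  set s2 := (fuFind s.size s x).2 with hs2
  have hd2 : dep s2 y < s2.size := by
    rw [size_eq_keys_length, hF2]
    exact lt_of_le_of_lt (hF5 y) (dep_lt_size hInv hy)
  obtain ⟨hG1, hG2, hG3, hG4, hG5, hG6⟩ :=
    find_ok s2.size s2 y hF3 (by rw [hF2]; exact hy) hd2
  set s3 := (fuFind s2.size s2 y).2 with hs3
  have hkeys3 : s3.keys = s.keys := by rw [hG2, hF2]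
  have hroots3 : ∀ z, rootOf s3 z = rootOf s z := fun z => by rw [hG4 z, hF4 z]
  have hcnt3 : rootsCount s3 = rootsCount s :=
    rootsCount_congr hkeys3 (fun z _ => by rw [hG6 z, hF6 z])
  have hrx : (fuFind s.size s x).1 = rootOf s x := hF1
  have hry : (fuFind s2.size s2 y).1 = rootOf s2 y := hG1
  have hry' : rootOf s2 y = rootOf s y := hF4 y
  by_cases hne : rootOf s x = rootOf s y
  · -- same root: no link
    have hres : fuUnion s c x y = (s3, c) := by
      simp only [fuUnion, hrx]
      simp only [hry, hry', ← hs2, ← hs3]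
      rw [if_neg (by simp [hne])]
    rw [hres]
    refine ⟨hG3, hkeys3, fun h => by rw [h, hcnt3], ?_⟩
    intro z w
    unfold eqv
    rw [hroots3 z, hroots3 w]
    constructor
    · exact fun h => Or.inl h
    · rintro (h | ⟨h1, h2⟩ | ⟨h1, h2⟩)
      · exact h
      · rw [h1, h2, hne]
      · rw [h1, h2, hne]
  · -- distinct roots: link rx -> ry
    have hrxk : rootOf s x ∈ s3.keys := by rw [hkeys3]; exact rootOf_mem hInv hx
    have hryk : rootOf s y ∈ s3.keys := by rw [hkeys3]; exact rootOf_mem hInv hy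
    have hrxr : isRoot s3 (rootOf s x) := by
      rw [hG6, hF6]
      exact isRoot_rootOf (hInv.2.2 x)
    have hryr : isRoot s3 (rootOf s y) := by
      rw [hG6, hF6]
      exact isRoot_rootOf (hInv.2.2 y)
    obtain ⟨hL1, hLk, hLr, hLc⟩ := link_ok hG3 hrxk hryk hrxr hryr hne
    have hres : fuUnion s c x y = (s3.insert (rootOf s x) (rootOf s y), c - 1) := by
      simp only [fuUnion, hrx]
      simp only [hry, hry', ← hs2, ← hs3]
      rw [if_pos (by simp [hne])]
    rw [hres]
    have hroot4 : ∀ z, rootOf (s3.insert (rootOf s x) (rootOf s y)) z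
        = if rootOf s z = rootOf s x then rootOf s y else rootOf s z := by
      intro z
      rw [hLr z, hroots3 z]
    refine ⟨hL1, by rw [hLk, hkeys3], ?_, ?_⟩
    · intro h
      have hc := hLc
      rw [hcnt3] at hc
      simp only [h]
      omega
    · intro z w
      unfold eqv
      rw [hroot4 z, hroot4 w]
      by_cases h1 : rootOf s z = rootOf s x <;> by_cases h2 : rootOf s w = rootOf s x
      · rw [if_pos h1, if_pos h2]
        exact ⟨fun _ => Or.inl (h1.trans h2.symm), fun _ => rfl⟩
      · rw [if_pos h1, if_neg h2]
        constructor
        · exact fun h => Or.inr (Or.inl ⟨h1, h.symm⟩)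
        · rintro (h | ⟨h3, h4⟩ | ⟨h3, h4⟩)
          · exact absurd (h.symm.trans h1) h2
          · exact h4.symm
          · exact absurd h4 h2
      · rw [if_neg h1, if_pos h2]
        constructor
        · exact fun h => Or.inr (Or.inr ⟨h, h2⟩)
        · rintro (h | ⟨h3, h4⟩ | ⟨h3, h4⟩)
          · exact absurd (h.trans h2) h1
          · exact absurd h3 h1
          · exact h3
      · rw [if_neg h1, if_neg h2]
        constructor
        · exact fun h => Or.inl h
        · rintro (h | ⟨h3, h4⟩ | ⟨h3, h4⟩)
          · exact h
          · exact absurd h3 h1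
          · exact absurd h4 h2

-- ---- A's per-string processing ----
def stepA (st : PySem.Dict Char Char × Int) (f : String) : PySem.Dict Char Char × Int :=
  let letters := f.toList
  let st1 := letters.foldl (fun st a => fuMakeset st.1 st.2 a) st
  (PySem.List.pyRange 0 (letters.length : Int)).foldl (fun st i =>
    let a := PySem.List.pyGetD letters i ' '
    (PySem.List.pyRange (i+1) (letters.length : Int)).foldl (fun st j =>
      let b := PySem.List.pyGetD letters j ' '
      fuUnion st.1 st.2 a b) st) st1

lemma solve_eq_foldl (F : List String) :
    solve F = (F.foldl stepA (PySem.Dict.empty, 0)).2 := rfl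

lemma makesets_fold : ∀ (L : List Char) (st : PySem.Dict Char Char × Int),
    InvA st.1 →
    InvA (L.foldl (fun st a => fuMakeset st.1 st.2 a) st).1
    ∧ (L.foldl (fun st a => fuMakeset st.1 st.2 a) st).1.keys = PySem.Set.update st.1.keys L
    ∧ (∀ z, rootOf (L.foldl (fun st a => fuMakeset st.1 st.2 a) st).1 z = rootOf st.1 z)
    ∧ (st.2 = (rootsCount st.1 : Int) →
        (L.foldl (fun st a => fuMakeset st.1 st.2 a) st).2
          = (rootsCount (L.foldl (fun st a => fuMakeset st.1 st.2 a) st).1 : Int)) := by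
  intro L
  induction L with
  | nil =>
      intro st h
      exact ⟨h, by rw [PySem.Set.update_nil]; rfl, fun z => rfl, fun h => h⟩
  | cons a L ih =>
      intro st h
      obtain ⟨hM1, hM2, hM3, hM4⟩ := makeset_ok h st.2 a
      obtain ⟨hI1, hI2, hI3, hI4⟩ := ih (fuMakeset st.1 st.2 a) hM1
      simp only [List.foldl_cons]
      refine ⟨hI1, ?_, fun z => by rw [hI3 z, hM3 z], fun hc => hI4 (hM4 hc)⟩
      rw [hI2, hM2, PySem.Set.update_cons]

-- loop invariant for the all-pairs union loops, relative to the post-makeset state s0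
def Good (s0 : PySem.Dict Char Char) (L : List Char)
    (st : PySem.Dict Char Char × Int) : Prop :=
  InvA st.1 ∧ st.1.keys = s0.keys ∧ st.2 = (rootsCount st.1 : Int)
  ∧ (∀ z w, eqv s0 z w → eqv st.1 z w)
  ∧ (∀ z w, eqv st.1 z w → eqv s0 z w ∨
      ((∃ a ∈ L, eqv s0 z a) ∧ (∃ b ∈ L, eqv s0 w b)))

lemma good_union {s0 : PySem.Dict Char Char} {L : List Char}
    {st : PySem.Dict Char Char × Int} (h : Good s0 L st)
    (hkeys : ∀ c ∈ L, c ∈ s0.keys) {a b : Char} (ha : a ∈ L) (hb : b ∈ L) :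
    Good s0 L (fuUnion st.1 st.2 a b)
    ∧ (∀ z w, eqv st.1 z w → eqv (fuUnion st.1 st.2 a b).1 z w)
    ∧ eqv (fuUnion st.1 st.2 a b).1 a b := by
  obtain ⟨hInv, hk, hc, hlo, hhi⟩ := h
  have hak : a ∈ st.1.keys := by rw [hk]; exact hkeys a ha
  have hbk : b ∈ st.1.keys := by rw [hk]; exact hkeys b hb
  obtain ⟨hU1, hU2, hU3, hU4⟩ := union_ok hInv st.2 hak hbk
  have hmono : ∀ z w, eqv st.1 z w → eqv (fuUnion st.1 st.2 a b).1 z w := by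
    intro z w hzw
    rw [hU4]
    exact Or.inl hzw
  have hconn : ∀ z v, eqv st.1 z v → v ∈ L → ∃ a' ∈ L, eqv s0 z a' := by
    intro z v hzv hv
    rcases hhi z v hzv with h | ⟨h1, h2⟩
    · exact ⟨v, hv, h⟩
    · exact h1
  refine ⟨⟨hU1, by rw [hU2, hk], hU3 hc, ?_, ?_⟩, hmono, ?_⟩
  · intro z w hzw
    exact hmono z w (hlo z w hzw)
  · intro z w hzw
    rw [hU4] at hzw
    rcases hzw with h | ⟨h1, h2⟩ | ⟨h1, h2⟩
    · exact hhi z w h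
    · exact Or.inr ⟨hconn z a h1 ha, hconn w b h2 hb⟩
    · exact Or.inr ⟨hconn z b h1 hb, hconn w a h2 ha⟩
  · rw [hU4]
    exact Or.inr (Or.inl ⟨eqv_refl _ a, eqv_refl _ b⟩)

lemma inner_fold {s0 : PySem.Dict Char Char} {L : List Char}
    (hkeys : ∀ c ∈ L, c ∈ s0.keys) (a : Char) (ha : a ∈ L) :
    ∀ (js : List Int) (st : PySem.Dict Char Char × Int), Good s0 L st →
    (∀ j ∈ js, 0 ≤ j ∧ j < (L.length : Int)) →
    Good s0 L (js.foldl (fun st j =>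
        fuUnion st.1 st.2 a (PySem.List.pyGetD L j ' ')) st)
    ∧ (∀ z w, eqv st.1 z w → eqv (js.foldl (fun st j =>
        fuUnion st.1 st.2 a (PySem.List.pyGetD L j ' ')) st).1 z w)
    ∧ (∀ j ∈ js, eqv (js.foldl (fun st j =>
        fuUnion st.1 st.2 a (PySem.List.pyGetD L j ' ')) st).1 a
        (PySem.List.pyGetD L j ' ')) := by
  intro js
  induction js with
  | nil => exact fun st h _ => ⟨h, fun z w hz => hz, by simp⟩
  | cons j js ih =>
      intro st h hjs
      have hjb : PySem.List.pyGetD L j ' ' ∈ L :=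
        PySem.List.pyGetD_mem L ' ' (by
          have := hjs j (List.mem_cons_self)
          constructor <;> omega)
      obtain ⟨hG, hmono, hab⟩ := good_union h hkeys ha hjb
      obtain ⟨hG', hmono', hall⟩ :=
        ih (fuUnion st.1 st.2 a (PySem.List.pyGetD L j ' ')) hG
          (fun j' hj' => hjs j' (List.mem_cons_of_mem j hj'))
      simp only [List.foldl_cons]
      refine ⟨hG', fun z w hz => hmono' _ _ (hmono z w hz), ?_⟩
      intro j' hj'
      rcases List.mem_cons.1 hj' with rfl | hj'
      · exact hmono' _ _ hab
      · exact hall j' hj'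

lemma outer_fold {s0 : PySem.Dict Char Char} {L : List Char}
    (hkeys : ∀ c ∈ L, c ∈ s0.keys) :
    ∀ (is_ : List Int) (st : PySem.Dict Char Char × Int), Good s0 L st →
    (∀ i ∈ is_, 0 ≤ i ∧ i < (L.length : Int)) →
    Good s0 L (is_.foldl (fun st i =>
        (PySem.List.pyRange (i+1) (L.length : Int)).foldl (fun st j =>
          fuUnion st.1 st.2 (PySem.List.pyGetD L i ' ') (PySem.List.pyGetD L j ' ')) st) st)
    ∧ (∀ z w, eqv st.1 z w → eqv (is_.foldl (fun st i =>
        (PySem.List.pyRange (i+1) (L.length : Int)).foldl (fun st j =>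
          fuUnion st.1 st.2 (PySem.List.pyGetD L i ' ') (PySem.List.pyGetD L j ' ')) st) st).1 z w) := by
  intro is_
  induction is_ with
  | nil => exact fun st h _ => ⟨h, fun z w hz => hz⟩
  | cons i is_ ih =>
      intro st h his
      have hia : PySem.List.pyGetD L i ' ' ∈ L :=
        PySem.List.pyGetD_mem L ' ' (by
          have := his i (List.mem_cons_self)
          constructor <;> omega)
      obtain ⟨hG, hmono, -⟩ := inner_fold hkeys _ hia (PySem.List.pyRange (i+1) (L.length : Int)) st h
        (fun j hj => by
          have := PySem.List.mem_pyRange_one.1 hj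
          have := his i (List.mem_cons_self)
          constructor <;> omega)
      obtain ⟨hG', hmono'⟩ := ih _ hG (fun i' hi' => his i' (List.mem_cons_of_mem i hi'))
      simp only [List.foldl_cons]
      exact ⟨hG', fun z w hz => hmono' _ _ (hmono z w hz)⟩

-- A's processing of one string merges exactly the classes meeting its letters
lemma stringA {s : PySem.Dict Char Char} {c : Int} (hInv : InvA s)
    (hc : c = (rootsCount s : Int)) (f : String) :
    InvA (stepA (s, c) f).1
    ∧ (stepA (s, c) f).1.keys = PySem.Set.update s.keys f.toList
    ∧ (stepA (s, c) f).2 = (rootsCount (stepA (s, c) f).1 : Int)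
    ∧ (∀ z w, eqv (stepA (s, c) f).1 z w ↔ eqv s z w ∨
        ((∃ a ∈ f.toList, eqv s z a) ∧ (∃ b ∈ f.toList, eqv s w b))) := by
  set L := f.toList with hL
  obtain ⟨hM1, hM2, hM3, hM4⟩ := makesets_fold L (s, c) hInv
  set st1 := L.foldl (fun st a => fuMakeset st.1 st.2 a) (s, c) with hst1
  have heqv0 : ∀ z w, eqv st1.1 z w ↔ eqv s z w := by
    intro z w
    unfold eqv
    rw [hM3 z, hM3 w]
  have hkeys : ∀ a ∈ L, a ∈ st1.1.keys := by
    intro a ha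
    rw [hM2, PySem.Set.mem_update]
    exact Or.inr ha
  have hGood : Good st1.1 L st1 := by
    refine ⟨hM1, rfl, hM4 hc, fun z w h => h, fun z w h => Or.inl h⟩
  have hstep : stepA (s, c) f = (PySem.List.pyRange 0 (L.length : Int)).foldl
      (fun st i => (PySem.List.pyRange (i+1) (L.length : Int)).foldl (fun st j =>
        fuUnion st.1 st.2 (PySem.List.pyGetD L i ' ') (PySem.List.pyGetD L j ' ')) st) st1 := rfl
  by_cases hnil : L = []
  · -- empty string: nothing happens
    have hrange : PySem.List.pyRange 0 ((L.length : Int)) = [] := by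
      rw [hnil]
      simp [PySem.List.pyRange_one_eq_nil]
    have hres : stepA (s, c) f = st1 := by rw [hstep, hrange]; rfl
    rw [hres]
    refine ⟨hM1, by rw [hM2], hM4 hc, ?_⟩
    intro z w
    rw [heqv0 z w, hnil]
    simp
  · have hlen : 0 < (L.length : Int) := by
      have := List.length_pos_iff.2 hnil
      omega
    have hrange : PySem.List.pyRange 0 ((L.length : Int))
        = 0 :: PySem.List.pyRange 1 ((L.length : Int)) := by
      rw [PySem.List.pyRange_one_cons hlen]
      norm_num
    set a0 := PySem.List.pyGetD L (0 : Int) ' ' with ha0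
    have ha0L : a0 ∈ L := PySem.List.pyGetD_mem L ' ' (by constructor <;> omega)
    obtain ⟨hI1, hI2, hI3⟩ := inner_fold hkeys a0 ha0L
      (PySem.List.pyRange (0+1) ((L.length : Int))) st1 hGood
      (fun j hj => by
        have := PySem.List.mem_pyRange_one.1 hj
        constructor <;> omega)
    set st2 := (PySem.List.pyRange (0+1) ((L.length : Int))).foldl (fun st j =>
        fuUnion st.1 st.2 a0 (PySem.List.pyGetD L j ' ')) st1 with hst2
    have hconn2 : ∀ b ∈ L, eqv st2.1 a0 b := by
      intro b hb
      obtain ⟨k, hk, rfl⟩ := List.getElem_of_mem hb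
      by_cases hk0 : k = 0
      · subst hk0
        have : a0 = L[0] := by
          rw [ha0, PySem.List.pyGetD_eq_getElem L (i := (0 : Int)) ' ' le_rfl (by omega)]
          rfl
        rw [← this]
        exact eqv_refl _ a0
      · have hmem : ((k : Int)) ∈ PySem.List.pyRange 1 ((L.length : Int)) := by
          rw [PySem.List.mem_pyRange_one]
          constructor <;> omega
        have hval : PySem.List.pyGetD L ((k : Int)) ' ' = L[k] := by
          rw [PySem.List.pyGetD_eq_getElem L (i := ((k : Int))) ' ' (by omega) (by omega)]
          congr 1
        have := hI3 ((k : Int)) (by simpa using hmem)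
        rwa [hval] at this
    obtain ⟨hO1, hO2⟩ := outer_fold hkeys (PySem.List.pyRange 1 ((L.length : Int))) st2 hI1
      (fun i hi => by
        have := PySem.List.mem_pyRange_one.1 hi
        constructor <;> omega)
    set fin := (PySem.List.pyRange 1 ((L.length : Int))).foldl (fun st i =>
        (PySem.List.pyRange (i+1) ((L.length : Int))).foldl (fun st j =>
          fuUnion st.1 st.2 (PySem.List.pyGetD L i ' ') (PySem.List.pyGetD L j ' ')) st) st2 with hfin
    have hres : stepA (s, c) f = fin := by
      rw [hstep, hrange, List.foldl_cons]
    have hconnF : ∀ b ∈ L, eqv fin.1 a0 b := fun b hb => hO2 _ _ (hconn2 b hb)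
    rw [hres]
    obtain ⟨hQ1, hQ2, hQ3, hQ4, hQ5⟩ := hO1
    refine ⟨hQ1, by rw [hQ2, hM2], hQ3, ?_⟩
    intro z w
    constructor
    · intro h
      rcases hQ5 z w h with h' | ⟨⟨a, ha, hza⟩, ⟨b, hb, hwb⟩⟩
      · exact Or.inl ((heqv0 z w).1 h')
      · exact Or.inr ⟨⟨a, ha, (heqv0 z a).1 hza⟩, ⟨b, hb, (heqv0 w b).1 hwb⟩⟩
    · rintro (h | ⟨⟨a, ha, hza⟩, ⟨b, hb, hwb⟩⟩)
      · exact hQ4 z w ((heqv0 z w).2 h)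
      · have h1 : eqv fin.1 z a := hQ4 z a ((heqv0 z a).2 hza)
        have h2 : eqv fin.1 w b := hQ4 w b ((heqv0 w b).2 hwb)
        have h3 : eqv fin.1 a0 a := hconnF a ha
        have h4 : eqv fin.1 a0 b := hconnF b hb
        exact (h1.trans h3.symm).trans (h4.trans h2.symm)

-- ---- B's per-string processing ----
def stepB (comps : List (PySem.Set Char)) (f : String) : List (PySem.Set Char) :=
  let s := PySem.Set.ofList f.toList
  if s = [] then comps
  else
    let kp := comps.foldl
      (fun (acc : List (PySem.Set Char) × PySem.Set Char) c =>
        if PySem.Set.inter c s ≠ [] then (acc.1, PySem.Set.union acc.2 c)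
        else (acc.1 ++ [c], acc.2)) ([], s)
    kp.1 ++ [kp.2]

lemma solve_alt_eq_foldl (F : List String) :
    solve_alt F = ((F.foldl stepB []).length : Int) := rfl

lemma bfold (s : PySem.Set Char) : ∀ (comps : List (PySem.Set Char))
    (k0 : List (PySem.Set Char)) (m0 : PySem.Set Char),
    comps.foldl (fun (acc : List (PySem.Set Char) × PySem.Set Char) c =>
        if PySem.Set.inter c s ≠ [] then (acc.1, PySem.Set.union acc.2 c)
        else (acc.1 ++ [c], acc.2)) (k0, m0)
    = (k0 ++ comps.filter (fun c => decide (PySem.Set.inter c s = [])),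
       (comps.filter (fun c => !decide (PySem.Set.inter c s = []))).foldl
         PySem.Set.union m0) := by
  intro comps
  induction comps with
  | nil => intro k0 m0; simp
  | cons c comps ih =>
      intro k0 m0
      by_cases hc : PySem.Set.inter c s = []
      · rw [List.foldl_cons, if_neg (by simp [hc]), ih]
        simp [hc]
      · rw [List.foldl_cons, if_pos (by simp [hc]), ih]
        simp [hc]

lemma mem_foldl_union : ∀ (l : List (PySem.Set Char)) (m : PySem.Set Char) (z : Char),
    z ∈ l.foldl PySem.Set.union m ↔ z ∈ m ∨ ∃ c ∈ l, z ∈ c := by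
  intro l
  induction l with
  | nil => intro m z; simp
  | cons c l ih =>
      intro m z
      rw [List.foldl_cons, ih, PySem.Set.mem_union]
      constructor
      · rintro ((h | h) | ⟨c', hc', hz⟩)
        · exact Or.inl h
        · exact Or.inr ⟨c, List.mem_cons_self, h⟩
        · exact Or.inr ⟨c', List.mem_cons_of_mem c hc', hz⟩
      · rintro (h | ⟨c', hc', hz⟩)
        · exact Or.inl (Or.inl h)
        · rcases List.mem_cons.1 hc' with rfl | hc'
          · exact Or.inl (Or.inr hz)
          · exact Or.inr ⟨c', hc', hz⟩

lemma overlap_eq : ∀ (comps : List (PySem.Set Char)),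
    List.Pairwise (fun c c' => ∀ z, z ∈ c → z ∉ c') comps →
    ∀ {c c' : PySem.Set Char} {z : Char}, c ∈ comps → c' ∈ comps →
    z ∈ c → z ∈ c' → c = c' := by
  intro comps
  induction comps with
  | nil => intro _ c c' z h; simp at h
  | cons d rest ih =>
      intro hpw c c' z hc hc' hzc hzc'
      rw [List.pairwise_cons] at hpw
      rcases List.mem_cons.1 hc with h1 | h1 <;> rcases List.mem_cons.1 hc' with h2 | h2
      · rw [h1, h2]
      · rw [h1] at hzc
        exact absurd hzc' (hpw.1 c' h2 z hzc)
      · rw [h2] at hzc'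
        exact absurd hzc (hpw.1 c h1 z hzc')
      · exact ih hpw.2 h1 h2 hzc hzc'

lemma eqv_cases {s : PySem.Dict Char Char} (hInv : InvA s) {z a : Char}
    (h : eqv s z a) : z = a ∨ (z ∈ s.keys ∧ a ∈ s.keys) := by
  by_cases hz : z ∈ s.keys <;> by_cases ha : a ∈ s.keys
  · exact Or.inr ⟨hz, ha⟩
  · exfalso
    have h1 : rootOf s a = a := rootOf_of_not_mem s a ha
    have h2 : rootOf s z ∈ s.keys := rootOf_mem hInv hz
    rw [eqv, h1] at h
    exact ha (h ▸ h2)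
  · exfalso
    have h1 : rootOf s z = z := rootOf_of_not_mem s z hz
    have h2 : rootOf s a ∈ s.keys := rootOf_mem hInv ha
    rw [eqv, h1] at h
    exact hz (h.symm ▸ h2)
  · left
    have h1 : rootOf s z = z := rootOf_of_not_mem s z hz
    have h2 : rootOf s a = a := rootOf_of_not_mem s a ha
    rw [eqv, h1, h2] at h
    exact h

-- B's one-string update preserves the state relation
lemma relab_step {s s' : PySem.Dict Char Char} {comps : List (PySem.Set Char)}
    {L : List Char} (hInv : InvA s)
    (hkeys' : s'.keys = PySem.Set.update s.keys L)
    (heqv' : ∀ z w, eqv s' z w ↔ eqv s z w ∨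
        ((∃ a ∈ L, eqv s z a) ∧ (∃ b ∈ L, eqv s w b)))
    (hR : RelAB s comps) (hnil : L ≠ []) :
    RelAB s' ((comps.filter (fun c => decide (PySem.Set.inter c (PySem.Set.ofList L) = [])))
      ++ [(comps.filter (fun c => !decide (PySem.Set.inter c (PySem.Set.ofList L) = []))).foldl
            PySem.Set.union (PySem.Set.ofList L)]) := by
  obtain ⟨hsupp, hclass, hpw, hne⟩ := hR
  set sl := PySem.Set.ofList L with hsl
  set keep := comps.filter (fun c => decide (PySem.Set.inter c sl = [])) with hkeep
  set touched := comps.filter (fun c => !decide (PySem.Set.inter c sl = [])) with htouched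
  set merged := touched.foldl PySem.Set.union sl with hmerged
  have hkeepc : ∀ c ∈ keep, c ∈ comps ∧ PySem.Set.inter c sl = [] := by
    intro c hc
    have := List.mem_filter.1 hc
    exact ⟨this.1, by simpa using this.2⟩
  have htouchc : ∀ c ∈ touched, c ∈ comps ∧ PySem.Set.inter c sl ≠ [] := by
    intro c hc
    have := List.mem_filter.1 hc
    exact ⟨this.1, by simpa using this.2⟩
  have hinter : ∀ c, PySem.Set.inter c sl ≠ [] ↔ ∃ y ∈ c, y ∈ L := by
    intro c
    constructor
    · intro h
      obtain ⟨y, hy⟩ := List.exists_mem_of_ne_nil _ h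
      rw [PySem.Set.mem_inter] at hy
      exact ⟨y, hy.1, (PySem.Set.mem_ofList L y).1 hy.2⟩
    · rintro ⟨y, hyc, hyL⟩
      exact List.ne_nil_of_mem ((PySem.Set.mem_inter c sl y).2
        ⟨hyc, (PySem.Set.mem_ofList L y).2 hyL⟩)
  have hmem_merged : ∀ z, z ∈ merged ↔ z ∈ L ∨ ∃ c ∈ touched, z ∈ c := by
    intro z
    rw [hmerged, mem_foldl_union, hsl, PySem.Set.mem_ofList]
  -- connectivity to a letter ↔ membership in the merged component
  have hconn_merged : ∀ z, (∃ a ∈ L, eqv s z a) ↔ z ∈ merged := by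
    intro z
    constructor
    · rintro ⟨a, haL, hza⟩
      rcases eqv_cases hInv hza with rfl | ⟨hz, ha⟩
      · exact (hmem_merged z).2 (Or.inl haL)
      · obtain ⟨c, hc, hzc, hac⟩ := (hclass z a hz ha).1 hza
        have hct : c ∈ touched := by
          rw [htouched, List.mem_filter]
          exact ⟨hc, by simp [(hinter c).2 ⟨a, hac, haL⟩]⟩
        exact (hmem_merged z).2 (Or.inr ⟨c, hct, hzc⟩)
    · intro hz
      rcases (hmem_merged z).1 hz with hzL | ⟨c, hc, hzc⟩
      · exact ⟨z, hzL, eqv_refl s z⟩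
      · obtain ⟨hcc, hint⟩ := htouchc c hc
        obtain ⟨y, hyc, hyL⟩ := (hinter c).1 hint
        have hzk : z ∈ s.keys := (hsupp z).2 ⟨c, hcc, hzc⟩
        have hyk : y ∈ s.keys := (hsupp y).2 ⟨c, hcc, hyc⟩
        exact ⟨y, hyL, (hclass z y hzk hyk).2 ⟨c, hcc, hzc, hyc⟩⟩
  refine ⟨?_, ?_, ?_, ?_⟩
  · -- support
    intro z
    rw [hkeys', PySem.Set.mem_update]
    constructor
    · rintro (hz | hz)
      · obtain ⟨c, hc, hzc⟩ := (hsupp z).1 hz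
        by_cases hc' : PySem.Set.inter c sl = []
        · exact ⟨c, List.mem_append_left _ (List.mem_filter.2 ⟨hc, by simp [hc']⟩), hzc⟩
        · refine ⟨merged, List.mem_append_right _ List.mem_cons_self, ?_⟩
          exact (hmem_merged z).2 (Or.inr ⟨c, List.mem_filter.2 ⟨hc, by simp [hc']⟩, hzc⟩)
      · exact ⟨merged, List.mem_append_right _ List.mem_cons_self,
          (hmem_merged z).2 (Or.inl hz)⟩
    · rintro ⟨c, hc, hzc⟩
      rcases List.mem_append.1 hc with hc | hc
      · exact Or.inl ((hsupp z).2 ⟨c, (hkeepc c hc).1, hzc⟩)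
      · rw [List.mem_singleton] at hc
        subst hc
        rcases (hmem_merged z).1 hzc with h | ⟨c', hc', hzc'⟩
        · exact Or.inr h
        · exact Or.inl ((hsupp z).2 ⟨c', (htouchc c' hc').1, hzc'⟩)
  · -- classes
    intro z w hz hw
    rw [heqv' z w]
    constructor
    · rintro (h | ⟨hcz, hcw⟩)
      · rcases eqv_cases hInv h with rfl | ⟨hzk, hwk⟩
        · -- same element: it lies in some component of the new list
          rw [hkeys', PySem.Set.mem_update] at hz
          rcases hz with hzk | hzL
          · obtain ⟨c, hc, hzc⟩ := (hsupp z).1 hzk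
            by_cases hc' : PySem.Set.inter c sl = []
            · exact ⟨c, List.mem_append_left _ (List.mem_filter.2 ⟨hc, by simp [hc']⟩),
                hzc, hzc⟩
            · have hm : z ∈ merged := (hmem_merged z).2
                (Or.inr ⟨c, List.mem_filter.2 ⟨hc, by simp [hc']⟩, hzc⟩)
              exact ⟨merged, List.mem_append_right _ List.mem_cons_self, hm, hm⟩
          · have hm : z ∈ merged := (hmem_merged z).2 (Or.inl hzL)
            exact ⟨merged, List.mem_append_right _ List.mem_cons_self, hm, hm⟩
        · obtain ⟨c, hc, hzc, hwc⟩ := (hclass z w hzk hwk).1 h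
          by_cases hc' : PySem.Set.inter c sl = []
          · exact ⟨c, List.mem_append_left _ (List.mem_filter.2 ⟨hc, by simp [hc']⟩),
              hzc, hwc⟩
          · have hct : c ∈ touched := List.mem_filter.2 ⟨hc, by simp [hc']⟩
            exact ⟨merged, List.mem_append_right _ List.mem_cons_self,
              (hmem_merged z).2 (Or.inr ⟨c, hct, hzc⟩),
              (hmem_merged w).2 (Or.inr ⟨c, hct, hwc⟩)⟩
      · exact ⟨merged, List.mem_append_right _ List.mem_cons_self,
          (hconn_merged z).1 hcz, (hconn_merged w).1 hcw⟩
    · rintro ⟨c, hc, hzc, hwc⟩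
      rcases List.mem_append.1 hc with hc | hc
      · obtain ⟨hcc, -⟩ := hkeepc c hc
        exact Or.inl ((hclass z w ((hsupp z).2 ⟨c, hcc, hzc⟩)
          ((hsupp w).2 ⟨c, hcc, hwc⟩)).2 ⟨c, hcc, hzc, hwc⟩)
      · rw [List.mem_singleton] at hc
        subst hc
        exact Or.inr ⟨(hconn_merged z).2 hzc, (hconn_merged w).2 hwc⟩
  · -- pairwise disjoint
    rw [List.pairwise_append]
    refine ⟨List.Pairwise.sublist List.filter_sublist hpw, by simp, ?_⟩
    intro c hc m hm z hzc hzm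
    rw [List.mem_singleton] at hm
    subst hm
    obtain ⟨hcc, hcint⟩ := hkeepc c hc
    rcases (hmem_merged z).1 hzm with hzL | ⟨c', hc', hzc'⟩
    · exact absurd hcint (by simp [(hinter c).2 ⟨z, hzc, hzL⟩])
    · obtain ⟨hcc', hcint'⟩ := htouchc c' hc'
      have := overlap_eq comps hpw hcc hcc' hzc hzc'
      rw [this] at hcint
      exact hcint' hcint
  · -- nonempty
    intro c hc
    rcases List.mem_append.1 hc with hc | hc
    · exact hne c (hkeepc c hc).1
    · rw [List.mem_singleton] at hc
      subst hc
      obtain ⟨a, ha⟩ := List.exists_mem_of_ne_nil L hnil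
      exact List.ne_nil_of_mem ((hmem_merged a).2 (Or.inl ha))

-- number of union-find roots = number of components
lemma count_eq {s : PySem.Dict Char Char} {comps : List (PySem.Set Char)}
    (hInv : InvA s) (hR : RelAB s comps) : rootsCount s = comps.length := by
  obtain ⟨hsupp, hclass, hpw, hne⟩ := hR
  have hhead : ∀ c ∈ comps, c.headI ∈ c := by
    intro c hc
    cases hcl : c with
    | nil => exact absurd hcl (hne c hc)
    | cons a t => exact List.mem_cons_self
  have hheadk : ∀ c ∈ comps, c.headI ∈ s.keys := by
    intro c hc
    exact (hsupp c.headI).2 ⟨c, hc, hhead c hc⟩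
  have hndcomps : comps.Nodup := by
    refine List.Pairwise.imp_of_mem ?_ hpw
    intro c c' hc hc' hdisj hcc'
    obtain ⟨a, ha⟩ := List.exists_mem_of_ne_nil c (hne c hc)
    exact hdisj a ha (hcc' ▸ ha)
  have hinj : ∀ c ∈ comps, ∀ c' ∈ comps,
      rootOf s c.headI = rootOf s c'.headI → c = c' := by
    intro c hc c' hc' h
    have heq : eqv s c.headI c'.headI := h
    obtain ⟨c'', hc'', h1, h2⟩ :=
      (hclass _ _ (hheadk c hc) (hheadk c' hc')).1 heq
    have e1 := overlap_eq comps hpw hc'' hc h1 (hhead c hc)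
    have e2 := overlap_eq comps hpw hc'' hc' h2 (hhead c' hc')
    rw [← e1, ← e2]
  have hnd1 : (comps.map (fun c => rootOf s c.headI)).Nodup :=
    List.Nodup.map_on hinj hndcomps
  have hnd2 : (s.keys.filter (fun z => decide (isRoot s z))).Nodup :=
    List.Nodup.filter _ hInv.1
  have hmem : ∀ r, r ∈ comps.map (fun c => rootOf s c.headI)
      ↔ r ∈ s.keys.filter (fun z => decide (isRoot s z)) := by
    intro r
    rw [List.mem_map, List.mem_filter]
    constructor
    · rintro ⟨c, hc, rfl⟩
      exact ⟨rootOf_mem hInv (hheadk c hc),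
        by simp only [decide_eq_true_eq]; exact isRoot_rootOf (hInv.2.2 c.headI)⟩
    · rintro ⟨hrk, hrr⟩
      have hroot : isRoot s r := by simpa using hrr
      obtain ⟨c, hc, hrc⟩ := (hsupp r).1 hrk
      refine ⟨c, hc, ?_⟩
      have heq : eqv s c.headI r := (hclass _ _ (hheadk c hc) hrk).2
        ⟨c, hc, hhead c hc, hrc⟩
      rw [heq]
      exact rootOf_of_isRoot hroot
  have hperm := (List.perm_ext_iff_of_nodup hnd1 hnd2).2 hmem
  have := hperm.length_eq
  rw [List.length_map] at this
  unfold rootsCount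
  omega

-- ---- main simulation over the list of strings ----
lemma main_fold : ∀ (F : List String) (st : PySem.Dict Char Char × Int)
    (comps : List (PySem.Set Char)), InvA st.1 →
    st.2 = (rootsCount st.1 : Int) → RelAB st.1 comps →
    InvA (F.foldl stepA st).1
    ∧ (F.foldl stepA st).2 = (rootsCount (F.foldl stepA st).1 : Int)
    ∧ RelAB (F.foldl stepA st).1 (F.foldl stepB comps) := by
  intro F
  induction F with
  | nil => exact fun st comps h1 h2 h3 => ⟨h1, h2, h3⟩
  | cons f F ih =>
      intro st comps hInv hc hR
      obtain ⟨hA1, hA2, hA3, hA4⟩ :=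
        stringA (s := st.1) (c := st.2) hInv hc f
      simp only [List.foldl_cons]
      by_cases hnil : f.toList = []
      · have hBstep : stepB comps f = comps := by
          unfold stepB
          rw [hnil]
          simp
        have hAR : RelAB (stepA st f).1 comps := by
          obtain ⟨hsupp, hclass, hpw, hne⟩ := hR
          have hkeys : (stepA st f).1.keys = st.1.keys := by
            have := hA2
            rw [hnil, PySem.Set.update_nil] at this
            exact this
          have heqviff : ∀ z w, eqv (stepA st f).1 z w ↔ eqv st.1 z w := by
            intro z w
            rw [hA4 z w, hnil]
            simp
          exact ⟨fun z => by rw [hkeys]; exact hsupp z,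
            fun z w hz hw => by
              rw [heqviff z w]
              exact hclass z w (by rwa [hkeys] at hz) (by rwa [hkeys] at hw),
            hpw, hne⟩
        rw [hBstep]
        exact ih (stepA st f) comps hA1 hA3 hAR
      · have hsl : PySem.Set.ofList f.toList ≠ [] := by
          obtain ⟨a, ha⟩ := List.exists_mem_of_ne_nil _ hnil
          exact List.ne_nil_of_mem ((PySem.Set.mem_ofList _ a).2 ha)
        have hBstep : stepB comps f =
            (comps.filter (fun c => decide (PySem.Set.inter c (PySem.Set.ofList f.toList) = [])))
            ++ [(comps.filter (fun c =>
                  !decide (PySem.Set.inter c (PySem.Set.ofList f.toList) = []))).foldl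
                PySem.Set.union (PySem.Set.ofList f.toList)] := by
          unfold stepB
          rw [if_neg hsl]
          rw [bfold]
          simp
        have hAR := relab_step hInv hA2 hA4 hR hnil
        rw [hBstep]
        exact ih (stepA st f) _ hA1 hA3 hAR

lemma invA_empty : InvA (PySem.Dict.empty : PySem.Dict Char Char) := by
  refine ⟨by simp [PySem.Dict.keys_empty], ?_, ?_⟩
  · intro x hx
    rw [PySem.Dict.keys_empty] at hx
    simp at hx
  · intro x
    refine ⟨0, ?_⟩
    show pf PySem.Dict.empty x = x
    simp [pf, PySem.Dict.getD_empty]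

lemma relab_empty : RelAB (PySem.Dict.empty : PySem.Dict Char Char) [] := by
  refine ⟨?_, ?_, List.Pairwise.nil, by simp⟩
  · intro z
    rw [PySem.Dict.keys_empty]
    simp
  · intro z w hz
    rw [PySem.Dict.keys_empty] at hz
    simp at hz

-- ===== VERDICT (by name: the statement is the Claim_ definition above) =====
theorem solve_spec : Claim_equal_solve := by
  intro F _
  unfold Spec_solve
  have hc0 : (0 : Int) = (rootsCount (PySem.Dict.empty : PySem.Dict Char Char) : Int) := by
    unfold rootsCount
    rw [PySem.Dict.keys_empty]
    simp
  obtain ⟨h1, h2, h3⟩ := main_fold F (PySem.Dict.empty, 0) [] invA_empty hc0 relab_empty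
  rw [solve_eq_foldl, solve_alt_eq_foldl, h2, count_eq h1 h3]
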